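-- pv_equiv track=rewrite | github.com/nicklave/Progetti_esercizi_unical | Esercizi_python/matrix_main_diag.py | funzione
-- ===== SOURCE A (Python) =====
-- def funzione(matrix):
--     somma = 0
--     vector = []
--     n = 0
--     prod = 1
--     for i in range(len(matrix)):
--         for j in range(len(matrix[i])):
--             if matrix[i][j] > 10:
--                 n += 1
--             if j < i:
--                 somma += matrix[i][j]
--             if i == j:
--                 prod *= matrix[i][j]
--     vector.append(somma)
--     vector.append(n)
--     vector.append(prod)
--
--     return vector
-- ===== SOURCE B (Python) =====
-- def funzione(matrix):
--     def peel(m):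
--         # peels the first row and first column: returns (sub-diagonal sum, diagonal product)
--         if not m:
--             return (0, 1)
--         head, rest = m[0], m[1:]
--         s, p = peel([row[1:] for row in rest])
--         s += sum(row[0] for row in rest if row)
--         if head:
--             p = p * head[0]
--         return (s, p)
--     somma, prod = peel(matrix)
--     n = sum(1 for row in matrix for x in row if x > 10)
--     return [somma, n, prod]
-- ===== Notes on version B (the rewrite author's own statement) =====
-- stated objective: alternative
-- what changed: Replaces A's fused double index-loop with a divide-and-conquer recursion that repeatedly peels off the first row and first column (the minor): the sub-diagonal sum is the first column of the remaining rows plus the sub-diagonal sum of the minor, and the diagonal product is the top-left entry times the diagonal product of the minor; the >10 count is a separate flat pass.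
import Mathlib
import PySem

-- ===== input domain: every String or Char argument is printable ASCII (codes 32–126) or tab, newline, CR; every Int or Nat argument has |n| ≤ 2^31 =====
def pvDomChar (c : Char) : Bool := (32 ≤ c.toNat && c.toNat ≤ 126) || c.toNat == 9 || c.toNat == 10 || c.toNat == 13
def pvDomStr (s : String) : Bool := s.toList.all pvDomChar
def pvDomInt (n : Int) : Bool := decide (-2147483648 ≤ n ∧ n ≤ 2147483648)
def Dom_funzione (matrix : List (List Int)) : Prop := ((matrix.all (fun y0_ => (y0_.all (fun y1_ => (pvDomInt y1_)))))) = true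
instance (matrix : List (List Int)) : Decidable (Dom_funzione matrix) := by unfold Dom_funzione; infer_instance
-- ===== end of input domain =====

-- B replaces A's fused double index-loop by a recursion that peels the first row and first
-- column (the minor) to get the sub-diagonal sum and the diagonal product, plus a flat pass
-- for the >10 count; objective: alternative. Both total.

-- ===== PORT A =====
-- one fused double loop over indices, state (somma, n, prod)
def funzione (matrix : List (List Int)) : List Int :=
  let st : Int × Int × Int :=
    (PySem.List.pyRange 0 (matrix.length : Int) 1).foldl (fun st i =>
      let row := PySem.List.pyGetD matrix i []
      (PySem.List.pyRange 0 (row.length : Int) 1).foldl (fun st j =>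
        let x := PySem.List.pyGetD row j 0
        let n := if 10 < x then st.2.1 + 1 else st.2.1
        let s := if j < i then st.1 + x else st.1
        let p := if i = j then st.2.2 * x else st.2.2
        (s, n, p)) st) ((0 : Int), (0 : Int), (1 : Int))
  [st.1, st.2.1, st.2.2]

-- ===== PORT B =====
-- peel(m): strips the first row and first column, recurses on the minor
def pvPeel : List (List Int) → Int × Int
  | [] => (0, 1)
  | head :: rest =>
    let sp := pvPeel (rest.map (fun row => PySem.List.slice row (some 1) none))
    let s := sp.1 + ((rest.filter (fun r => !r.isEmpty)).map (fun r => PySem.List.pyGetD r 0 0)).sum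
    let p := match head with
      | [] => sp.2
      | x :: _ => sp.2 * x
    (s, p)
termination_by m => m.length
decreasing_by simp

def funzione_alt (matrix : List (List Int)) : List Int :=
  let sp := pvPeel matrix
  let n : Int := ((matrix.flatMap (fun row => row.filter (fun x => decide (10 < x)))).length : Int)
  [sp.1, n, sp.2]

-- ===== PRECONDITION & SPEC =====
def Spec_funzione (matrix : List (List Int)) (out : List Int) : Prop := out = funzione_alt matrix
instance (matrix : List (List Int)) (out : List Int) : Decidable (Spec_funzione matrix out) := by unfold Spec_funzione; infer_instance

-- ===== CLAIM (what is proved, stated in full; the proofs are below) =====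
def Claim_equal_funzione : Prop := ∀ (matrix : List (List Int)), Dom_funzione matrix → Spec_funzione matrix (funzione matrix)

-- ===== LEMMAS AND PROOFS =====

-- reference forms: row-by-row sub-diagonal sum and diagonal product, counter i = row index
def specS : List (List Int) → Nat → Int
  | [], _ => 0
  | r :: m, i => (r.take i).sum + specS m (i + 1)

def specP : List (List Int) → Nat → Int
  | [], _ => 1
  | r :: m, i => (if i < r.length then r.getD i 0 else 1) * specP m (i + 1)

-- closed form of A's inner loop (row index i, inner counter starting at j0), by induction on the row
theorem funzione_inner (row : List Int) (i : Int) : ∀ (j0 : Int), 0 ≤ j0 → ∀ (s n p : Int),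
    (PySem.List.enumerate row j0).foldl (fun st (q : Int × Int) =>
        ((if q.1 < i then st.1 + q.2 else st.1),
         (if 10 < q.2 then st.2.1 + 1 else st.2.1),
         (if i = q.1 then st.2.2 * q.2 else st.2.2))) (s, n, p)
    = (s + (row.take (i - j0).toNat).sum,
       n + ((row.filter (fun x => decide (10 < x))).length : Int),
       p * (if j0 ≤ i ∧ i - j0 < (row.length : Int) then row.getD (i - j0).toNat 0 else 1)) := by
  induction row with
  | nil =>
    intro j0 hj s n p
    simp [PySem.List.enumerate_nil]
  | cons x r ih =>
    intro j0 hj s n p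
    rw [PySem.List.enumerate_cons, List.foldl_cons, ih (j0 + 1) (by omega)]
    refine Prod.ext ?_ (Prod.ext ?_ ?_)
    · by_cases h : j0 < i
      · have ht : (i - j0).toNat = (i - (j0 + 1)).toNat + 1 := by omega
        simp [h, ht, List.take_succ_cons]
        ring
      · have h1 : (i - j0).toNat = 0 := by omega
        have h2 : (i - (j0 + 1)).toNat = 0 := by omega
        simp [h, h1, h2]
    · simp only [List.filter_cons, decide_eq_true_eq]
      split_ifs with h
      · simp only [List.length_cons]
        push_cast
        ring
      · ring
    · by_cases hij : i = j0
      · simp [hij]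
      · by_cases h2 : j0 < i
        · have ht : (i - j0).toNat = (i - (j0 + 1)).toNat + 1 := by omega
          have hcond : (j0 ≤ i ∧ i - j0 < ((x :: r).length : Int)) ↔
              (j0 + 1 ≤ i ∧ i - (j0 + 1) < (r.length : Int)) := by
            simp [List.length_cons]; omega
          simp only [if_neg hij, ht, hcond, List.getD_cons_succ]
        · have hna : ¬ (j0 ≤ i) := by omega
          have hnb : ¬ (j0 + 1 ≤ i) := by omega
          simp [hij, hna, hnb]

-- closed form of A's outer loop in enumerate form, against the reference functions
theorem funzione_outer (m : List (List Int)) : ∀ (i0 : Int), 0 ≤ i0 → ∀ (s n p : Int),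
    (PySem.List.enumerate m i0).foldl
      (fun st (q : Int × List Int) =>
        (PySem.List.enumerate q.2 0).foldl (fun st (r : Int × Int) =>
          ((if r.1 < q.1 then st.1 + r.2 else st.1),
           (if 10 < r.2 then st.2.1 + 1 else st.2.1),
           (if q.1 = r.1 then st.2.2 * r.2 else st.2.2))) st) (s, n, p)
    = (s + specS m i0.toNat,
       n + ((m.flatMap (fun r => r.filter (fun x => decide (10 < x)))).length : Int),
       p * specP m i0.toNat) := by
  induction m with
  | nil =>
    intro i0 hi s n p
    simp [PySem.List.enumerate_nil, specS, specP]
  | cons r m' ih =>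
    intro i0 hi s n p
    rw [PySem.List.enumerate_cons]
    simp only [List.foldl_cons, List.flatMap_cons]
    rw [funzione_inner r i0 0 le_rfl s n p]
    rw [ih (i0 + 1) (by omega)]
    have htn : (i0 + 1).toNat = i0.toNat + 1 := by omega
    have h00 : (i0 - 0) = i0 := by ring
    refine Prod.ext ?_ (Prod.ext ?_ ?_)
    · simp [specS, htn, h00]
      ring
    · simp only [List.length_append]
      push_cast
      ring
    · simp only [specP, htn, h00]
      have hcond : ((0:Int) ≤ i0 ∧ i0 < (r.length : Int)) ↔ i0.toNat < r.length := by omega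
      by_cases hlt : i0.toNat < r.length
      · rw [if_pos (hcond.mpr hlt), if_pos hlt]
        ring
      · rw [if_neg (fun h => hlt (hcond.mp h)), if_neg hlt]
        ring

-- bridge: a Python index loop over range(len(xs)) reading xs[j] is the enumerate loop
theorem funzione_enum_foldl {α β : Type} (xs : List α) (d : α) (f : β → Int × α → β) (init : β) :
    (PySem.List.enumerate xs 0).foldl f init
    = (PySem.List.pyRange 0 (xs.length : Int) 1).foldl
        (fun st j => f st (j, PySem.List.pyGetD xs j d)) init := by
  rw [show ((xs.length : Int)) = PySem.List.len xs from (PySem.List.len_eq xs).symm]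
  rw [PySem.List.enumerate_eq_map_pyRange xs d, List.foldl_map]

-- shifting the counter down by one = passing to the minor: sum side
theorem specS_shift (m : List (List Int)) : ∀ (i : Nat),
    specS m (i + 1)
    = ((m.filter (fun r => !r.isEmpty)).map (fun r => PySem.List.pyGetD r 0 0)).sum
      + specS (m.map (fun r => r.tail)) i := by
  induction m with
  | nil => intro i; simp [specS]
  | cons r m' ih =>
    intro i
    simp only [specS, List.map_cons, List.filter_cons]
    rw [ih (i + 1)]
    cases r with
    | nil => simp
    | cons x t =>
      simp [List.take_succ_cons, PySem.List.pyGetD]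
      ring

-- shifting the counter down by one = passing to the minor: product side
theorem specP_shift (m : List (List Int)) : ∀ (i : Nat),
    specP m (i + 1) = specP (m.map (fun r => r.tail)) i := by
  induction m with
  | nil => intro i; simp [specP]
  | cons r m' ih =>
    intro i
    simp only [specP, List.map_cons]
    rw [ih (i + 1)]
    cases r with
    | nil => simp
    | cons x t => simp

-- B's peel computes the reference sum and product
theorem pvPeel_eq (m : List (List Int)) : pvPeel m = (specS m 0, specP m 0) := by
  induction m using pvPeel.induct with
  | case1 => simp [pvPeel, specS, specP]
  | case2 head rest ih =>
    simp only [List.map_subtype, List.unattach_attach] at ih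
    rw [pvPeel.eq_def]
    simp only [PySem.List.slice_from_one] at ih ⊢
    rw [ih]
    refine Prod.ext ?_ ?_
    · simp [specS, specS_shift rest 0]
      ring
    · simp only [specP, specP_shift rest 0]
      cases head with
      | nil => simp
      | cons x t => simp [mul_comm]

-- ===== VERDICT (by name: the statement is the Claim_ definition above) =====
theorem funzione_spec : Claim_equal_funzione := by
  intro matrix _
  unfold Spec_funzione
  have h := funzione_outer matrix 0 le_rfl 0 0 1
  rw [funzione_enum_foldl matrix ([] : List Int)] at h
  simp only [funzione_enum_foldl (d := (0 : Int))] at h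
  show funzione matrix = funzione_alt matrix
  simp only [funzione, funzione_alt, pvPeel_eq]
  rw [h]
  norm_num
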